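-- pv_equiv track=rewrite | github.com/mpsilamartin/mpsilamartin.github.io | info/TP/OLD/TP03_c.py | distance_min1
-- ===== SOURCE A (Python) =====
-- def distance_min1(T):  # On cherche min |Ti-tj| pour i<j
--     n=len(T)
--     min=abs(T[1]-T[0])
--     L=[0,1]
--     for i in range(n):
--         for j in range(i+1,n):
--             if abs(T[j]-T[i])<min:
--                 min=abs(T[j]-T[i])
--                 L=[i,j]
--     return('les valeurs sont aux rangs '+ str(L[0]) +' et ' + str(L[1]) + '. Ce sont '+ str(T[L[0]])+ ' et '+ str(T[L[1]]))
-- ===== SOURCE B (Python) =====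
-- def distance_min1(T):  # sort to find the minimal |Ti-Tj| via adjacent gaps, then locate the first pair
--     n = len(T)
--     S = sorted(T)
--     d = S[1] - S[0]
--     for k in range(2, n):
--         if S[k] - S[k - 1] < d:
--             d = S[k] - S[k - 1]
--     for i in range(n):
--         for j in range(i + 1, n):
--             if abs(T[j] - T[i]) == d:
--                 return ('les valeurs sont aux rangs ' + str(i) + ' et ' + str(j)
--                         + '. Ce sont ' + str(T[i]) + ' et ' + str(T[j]))
-- ===== Notes on version B (the rewrite author's own statement) =====
-- stated objective: faster
-- what changed: Instead of tracking a running minimum over all O(n^2) pairs, B sorts the values and takes the minimum adjacent gap as the exact minimal |Ti-Tj|, then a scan in index order stops at the first pair realizing that gap (A's tie-break).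
import Mathlib
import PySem

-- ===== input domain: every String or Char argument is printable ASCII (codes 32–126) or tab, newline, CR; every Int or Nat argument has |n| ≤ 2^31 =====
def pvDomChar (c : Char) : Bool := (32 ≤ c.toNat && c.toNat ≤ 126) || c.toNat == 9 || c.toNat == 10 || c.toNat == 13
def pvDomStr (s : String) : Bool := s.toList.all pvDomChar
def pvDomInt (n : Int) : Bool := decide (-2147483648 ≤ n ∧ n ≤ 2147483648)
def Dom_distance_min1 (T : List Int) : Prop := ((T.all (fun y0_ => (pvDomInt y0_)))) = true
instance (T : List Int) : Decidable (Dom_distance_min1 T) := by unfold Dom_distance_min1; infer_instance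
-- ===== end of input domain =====

-- B replaces A's quadratic running-minimum pair scan by sort + minimal adjacent gap, then an
-- index-order scan that stops at the first pair achieving that gap (objective: faster in practice).

-- ===== PORT A =====
def distance_min1 (T : List Int) : String :=
  let n : Int := T.length
  let st := (PySem.List.pyRange 0 n 1).foldl (fun s i =>
      (PySem.List.pyRange (i + 1) n 1).foldl (fun s j =>
        if |PySem.List.pyGetD T j 0 - PySem.List.pyGetD T i 0| < s.1 then
          (|PySem.List.pyGetD T j 0 - PySem.List.pyGetD T i 0|, (i, j))
        else s) s)
    (|PySem.List.pyGetD T 1 0 - PySem.List.pyGetD T 0 0|, ((0 : Int), (1 : Int)))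
  "les valeurs sont aux rangs " ++ PySem.Int.toStr st.2.1 ++ " et " ++ PySem.Int.toStr st.2.2 ++
    ". Ce sont " ++ PySem.Int.toStr (PySem.List.pyGetD T st.2.1 0) ++ " et " ++
    PySem.Int.toStr (PySem.List.pyGetD T st.2.2 0)

-- ===== PORT B =====
def distance_min1_alt (T : List Int) : String :=
  let n : Int := T.length
  let S := PySem.List.sorted T (fun x => x) false
  let d := (PySem.List.pyRange 2 n 1).foldl (fun d k =>
      if PySem.List.pyGetD S k 0 - PySem.List.pyGetD S (k - 1) 0 < d then
        PySem.List.pyGetD S k 0 - PySem.List.pyGetD S (k - 1) 0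
      else d)
    (PySem.List.pyGetD S 1 0 - PySem.List.pyGetD S 0 0)
  let p := (((PySem.List.pyRange 0 n 1).flatMap (fun i =>
      (PySem.List.pyRange (i + 1) n 1).map (fun j => (i, j)))).find?
      (fun q => decide (|PySem.List.pyGetD T q.2 0 - PySem.List.pyGetD T q.1 0| = d))).getD (0, 1)
  "les valeurs sont aux rangs " ++ PySem.Int.toStr p.1 ++ " et " ++ PySem.Int.toStr p.2 ++
    ". Ce sont " ++ PySem.Int.toStr (PySem.List.pyGetD T p.1 0) ++ " et " ++
    PySem.Int.toStr (PySem.List.pyGetD T p.2 0)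

-- ===== PRECONDITION & SPEC =====
-- Pre_ excludes lists of fewer than two elements, on which the Python A raises IndexError (T[1]).
def Pre_distance_min1 (T : List Int) : Prop := 2 ≤ T.length
instance (T : List Int) : Decidable (Pre_distance_min1 T) := by unfold Pre_distance_min1; infer_instance
def pvWitness_distance_min1 : List Int := [3, 1, 5]
def Spec_distance_min1 (T : List Int) (out : String) : Prop := out = distance_min1_alt T
instance (T : List Int) (out : String) : Decidable (Spec_distance_min1 T out) := by unfold Spec_distance_min1; infer_instance

-- ===== CLAIM (what is proved, stated in full; the proofs are below) =====
def Claim_equal_distance_min1 : Prop := ∀ (T : List Int), Dom_distance_min1 T → Pre_distance_min1 T → Spec_distance_min1 T (distance_min1 T)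

-- ===== LEMMAS AND PROOFS =====

-- pair difference and the lexicographic pair list, as they occur in both ports
def pvG (T : List Int) (q : Int × Int) : Int :=
  |PySem.List.pyGetD T q.2 0 - PySem.List.pyGetD T q.1 0|

def pvPairs (n : Int) : List (Int × Int) :=
  (PySem.List.pyRange 0 n 1).flatMap (fun i => (PySem.List.pyRange (i + 1) n 1).map (fun j => (i, j)))

lemma pv_mem_pairs (n : Int) (q : Int × Int) :
    q ∈ pvPairs n ↔ 0 ≤ q.1 ∧ q.1 < q.2 ∧ q.2 < n := by
  unfold pvPairs
  simp only [List.mem_flatMap, List.mem_map, PySem.List.mem_pyRange_one]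
  constructor
  · rintro ⟨i, hi, j, hj, rfl⟩
    exact ⟨hi.1, by omega, hj.2⟩
  · rintro ⟨h0, h12, h2n⟩
    exact ⟨q.1, ⟨h0, by omega⟩, q.2, ⟨by omega, h2n⟩, rfl⟩

lemma pv_pairs_cons (n : Int) (h : 2 ≤ n) : ∃ rest, pvPairs n = (0, 1) :: rest := by
  unfold pvPairs
  rw [PySem.List.pyRange_one_cons (by omega : (0 : Int) < n), List.flatMap_cons,
    PySem.List.pyRange_one_cons (by omega : (0 : Int) + 1 < n), List.map_cons]
  norm_num

-- characterisation of A's running-minimum loop: the final pair is the first pair whose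
-- difference equals the overall minimum (or the initial pair when nothing improves)
lemma pv_argmin (g : Int × Int → Int) (l : List (Int × Int)) (m : Int) (a : Int × Int) :
    (l.foldl (fun s q => if g q < s.1 then (g q, q) else s) (m, a)).2 =
      if (l.map g).foldl min m < m then
        (l.find? (fun q => decide (g q = (l.map g).foldl min m))).getD a
      else a := by
  induction l generalizing m a with
  | nil => simp
  | cons q0 t ih =>
    simp only [List.foldl_cons, List.map_cons]
    by_cases h0 : g q0 < m
    · rw [if_pos h0, ih]
      have hmin : min m (g q0) = g q0 := min_eq_right (le_of_lt h0)
      simp only [hmin]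
      have hle : (t.map g).foldl min (g q0) ≤ g q0 := (PySem.List.foldl_min_le (t.map g) (g q0)).1
      by_cases h1 : (t.map g).foldl min (g q0) < g q0
      · rw [if_pos h1, if_pos (lt_trans h1 h0),
          List.find?_cons_of_neg (by simp only [decide_eq_true_eq]; omega)]
        have hmem : (t.map g).foldl min (g q0) ∈ t.map g := by
          rcases PySem.List.foldl_min_mem (t.map g) (g q0) with hmm | hmm
          · omega
          · exact hmm
        obtain ⟨x, hx, hgx⟩ := List.mem_map.mp hmem
        have hsome : (t.find? (fun q => decide (g q = (t.map g).foldl min (g q0)))).isSome := by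
          rw [List.find?_isSome]
          exact ⟨x, hx, by simp [hgx]⟩
        obtain ⟨y, hy⟩ := Option.isSome_iff_exists.mp hsome
        rw [hy]; rfl
      · have heq : (t.map g).foldl min (g q0) = g q0 := le_antisymm hle (not_lt.mp h1)
        rw [if_neg h1, if_pos (by omega : (t.map g).foldl min (g q0) < m),
          List.find?_cons_of_pos (by simp [heq])]
        simp
    · rw [if_neg h0, ih]
      have hmin : min m (g q0) = m := min_eq_left (not_lt.mp h0)
      simp only [hmin]
      by_cases h1 : (t.map g).foldl min m < m
      · rw [if_pos h1, if_pos h1,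
          List.find?_cons_of_neg (by simp only [decide_eq_true_eq]; omega)]
      · rw [if_neg h1, if_neg h1]

lemma pv_count_two_of_pos (l : List Int) (x : Int) (p r : Nat) (hpr : p < r)
    (hr : r < l.length) (hp : l[p]? = some x) (hxx : l[r]? = some x) : 2 ≤ l.count x := by
  induction l generalizing p r with
  | nil => simp at hr
  | cons a t ih =>
    cases p with
    | zero =>
      cases r with
      | zero => omega
      | succ r' =>
        simp only [List.getElem?_cons_zero, Option.some.injEq] at hp
        rw [List.getElem?_cons_succ] at hxx
        have hmem : x ∈ t := List.mem_of_getElem? hxx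
        have hpos : 0 < t.count x := List.count_pos_iff.mpr hmem
        subst hp
        rw [List.count_cons_self]
        omega
    | succ p' =>
      cases r with
      | zero => omega
      | succ r' =>
        rw [List.getElem?_cons_succ] at hp hxx
        have := ih p' r' (by omega) (by simpa using hr) hp hxx
        have hle : t.count x ≤ (a :: t).count x := by
          simp only [List.count_cons]
          omega
        omega

lemma pv_pos_of_count_two (l : List Int) (x : Int) (h : 2 ≤ l.count x) :
    ∃ p r : Nat, p < r ∧ r < l.length ∧ l[p]? = some x ∧ l[r]? = some x := by
  induction l with
  | nil => simp at h
  | cons a t ih =>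
    by_cases ha : a = x
    · subst ha
      rw [List.count_cons_self] at h
      have hmem : a ∈ t := List.count_pos_iff.mp (by omega)
      obtain ⟨m, hm, hme⟩ := List.getElem_of_mem hmem
      exact ⟨0, m + 1, by omega, by simpa using hm, by simp,
        by simpa using List.getElem?_eq_some_iff.mpr ⟨hm, hme⟩⟩
    · have hcnt : 2 ≤ t.count x := by
        rw [List.count_cons] at h
        simp [ha] at h
        omega
      obtain ⟨p, r, h1, h2, h3, h4⟩ := ih hcnt
      exact ⟨p + 1, r + 1, by omega, by simpa using h2, by simpa using h3, by simpa using h4⟩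

-- every adjacent gap of the sorted list is the difference of some index pair of T
lemma pv_getElem_eq (l : List Int) {i j : Nat} (hij : i = j) (hi : i < l.length)
    (hj : j < l.length) : l[i]'hi = l[j]'hj := by
  subst hij; rfl

lemma pv_gap_realized (T : List Int) (_h2 : 2 ≤ T.length) (k : Int)
    (hk1 : 1 ≤ k) (hkn : k < (T.length : Int)) :
    ∃ q ∈ pvPairs (T.length : Int),
      pvG T q = PySem.List.pyGetD (PySem.List.sorted T (fun x => x) false) k 0 -
        PySem.List.pyGetD (PySem.List.sorted T (fun x => x) false) (k - 1) 0 := by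
  set S := PySem.List.sorted T (fun x => x) false with hSdef
  have hlen : S.length = T.length := PySem.List.length_sorted T (fun x => x) false
  have hperm : S.Perm T := PySem.List.sorted_perm T (fun x => x) false
  have hknS : k.toNat < S.length := by omega
  have hk0S : (k - 1).toNat < S.length := by omega
  rw [PySem.List.pyGetD_eq_getElem (i := k) S 0 (by omega) (by omega),
    PySem.List.pyGetD_eq_getElem (i := k - 1) S 0 (by omega) (by omega)]
  have hxy : S[(k - 1).toNat]'hk0S ≤ S[k.toNat]'hknS :=
    PySem.List.sorted_id_getElem_mono T (p := (k - 1).toNat) (q := k.toNat) (by omega) hknS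
  by_cases hxe : S[(k - 1).toNat]'hk0S = S[k.toNat]'hknS
  · have hc2 : 2 ≤ S.count (S[(k - 1).toNat]'hk0S) := by
      refine pv_count_two_of_pos S _ (k - 1).toNat k.toNat (by omega) hknS ?_ ?_
      · exact List.getElem?_eq_getElem _
      · rw [List.getElem?_eq_getElem hknS, ← hxe]
    have hcT : 2 ≤ T.count (S[(k - 1).toNat]'hk0S) := by
      rw [← hperm.count_eq]; exact hc2
    obtain ⟨p, r, hpr, hrT, hpv, hrv⟩ := pv_pos_of_count_two T _ hcT
    obtain ⟨hpL, hpe⟩ := List.getElem?_eq_some_iff.mp hpv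
    obtain ⟨hrL, hre⟩ := List.getElem?_eq_some_iff.mp hrv
    refine ⟨((p : Int), (r : Int)), (pv_mem_pairs _ _).mpr
      ⟨by show (0 : Int) ≤ (p : Int); positivity,
       by show (p : Int) < (r : Int); exact_mod_cast hpr,
       by show (r : Int) < ((T.length : Nat) : Int); exact_mod_cast hrT⟩, ?_⟩
    unfold pvG
    show |PySem.List.pyGetD T (r : Int) 0 - PySem.List.pyGetD T (p : Int) 0| = _
    rw [PySem.List.pyGetD_natCast, PySem.List.pyGetD_natCast,
      List.getD_eq_getElem T 0 hrL, List.getD_eq_getElem T 0 hpL, hpe, hre, ← hxe,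
      sub_self, abs_zero]
  · have hxlt : S[(k - 1).toNat]'hk0S < S[k.toNat]'hknS := lt_of_le_of_ne hxy hxe
    have hxT : S[(k - 1).toNat]'hk0S ∈ T := hperm.mem_iff.mp (List.getElem_mem _)
    have hyT : S[k.toNat]'hknS ∈ T := hperm.mem_iff.mp (List.getElem_mem _)
    obtain ⟨p, hpL, hpe⟩ := List.getElem_of_mem hxT
    obtain ⟨r, hrL, hre⟩ := List.getElem_of_mem hyT
    have hpv : T[p]? = some (S[(k - 1).toNat]'hk0S) := List.getElem?_eq_some_iff.mpr ⟨hpL, hpe⟩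
    have hrv : T[r]? = some (S[k.toNat]'hknS) := List.getElem?_eq_some_iff.mpr ⟨hrL, hre⟩
    have hne : p ≠ r := by
      intro h
      rw [h, hrv] at hpv
      have := Option.some.inj hpv
      omega
    rcases lt_or_gt_of_ne hne with hc | hc
    · refine ⟨((p : Int), (r : Int)), (pv_mem_pairs _ _).mpr
        ⟨by show (0 : Int) ≤ (p : Int); positivity,
         by show (p : Int) < (r : Int); exact_mod_cast hc,
         by show (r : Int) < ((T.length : Nat) : Int); exact_mod_cast hrL⟩, ?_⟩
      unfold pvG
      show |PySem.List.pyGetD T (r : Int) 0 - PySem.List.pyGetD T (p : Int) 0| = _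
      rw [PySem.List.pyGetD_natCast, PySem.List.pyGetD_natCast,
        List.getD_eq_getElem T 0 hrL, List.getD_eq_getElem T 0 hpL, hpe, hre]
      rw [abs_of_nonneg (by omega)]
    · refine ⟨((r : Int), (p : Int)), (pv_mem_pairs _ _).mpr
        ⟨by show (0 : Int) ≤ (r : Int); positivity,
         by show (r : Int) < (p : Int); exact_mod_cast hc,
         by show (p : Int) < ((T.length : Nat) : Int); exact_mod_cast hpL⟩, ?_⟩
      unfold pvG
      show |PySem.List.pyGetD T (p : Int) 0 - PySem.List.pyGetD T (r : Int) 0| = _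
      rw [PySem.List.pyGetD_natCast, PySem.List.pyGetD_natCast,
        List.getD_eq_getElem T 0 hpL, List.getD_eq_getElem T 0 hrL, hpe, hre]
      rw [abs_of_nonpos (by omega)]
      omega

-- every index-pair difference dominates some adjacent gap of the sorted list
lemma pv_gap_dominates (T : List Int) (_h2 : 2 ≤ T.length) (q : Int × Int)
    (hq : q ∈ pvPairs (T.length : Int)) :
    ∃ k : Int, 1 ≤ k ∧ k < (T.length : Int) ∧
      PySem.List.pyGetD (PySem.List.sorted T (fun x => x) false) k 0 -
        PySem.List.pyGetD (PySem.List.sorted T (fun x => x) false) (k - 1) 0 ≤ pvG T q := by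
  set S := PySem.List.sorted T (fun x => x) false with hSdef
  have hlen : S.length = T.length := PySem.List.length_sorted T (fun x => x) false
  have hperm : S.Perm T := PySem.List.sorted_perm T (fun x => x) false
  obtain ⟨h0, h12, h2n⟩ := (pv_mem_pairs _ _).mp hq
  have hiL : q.1.toNat < T.length := by omega
  have hjL : q.2.toNat < T.length := by omega
  have hij : q.1.toNat < q.2.toNat := by omega
  have hgq : pvG T q = |T[q.2.toNat]'hjL - T[q.1.toNat]'hiL| := by
    unfold pvG
    rw [PySem.List.pyGetD_eq_getElem (i := q.2) T 0 (by omega) (by omega),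
      PySem.List.pyGetD_eq_getElem (i := q.1) T 0 (by omega) (by omega)]
  have hmono : ∀ (p r : Nat) (_ : p < S.length) (hr : r < S.length), p ≤ r →
      S[p]'(by omega) ≤ S[r]'hr :=
    fun p r _ hr hpr => PySem.List.sorted_id_getElem_mono T (p := p) (q := r) hpr hr
  by_cases hxe : T[q.1.toNat]'hiL = T[q.2.toNat]'hjL
  · have hcT : 2 ≤ T.count (T[q.1.toNat]'hiL) := by
      refine pv_count_two_of_pos T _ q.1.toNat q.2.toNat hij hjL ?_ ?_
      · exact List.getElem?_eq_getElem _
      · rw [List.getElem?_eq_getElem hjL, ← hxe]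
    have hcS : 2 ≤ S.count (T[q.1.toNat]'hiL) := by
      rw [hperm.count_eq]; exact hcT
    obtain ⟨p, r, hpr, hrS, hpv, hrv⟩ := pv_pos_of_count_two S _ hcS
    obtain ⟨hpS, hpe⟩ := List.getElem?_eq_some_iff.mp hpv
    obtain ⟨hrS', hre⟩ := List.getElem?_eq_some_iff.mp hrv
    have hp1S : p + 1 < S.length := by omega
    refine ⟨((p : Int)) + 1, by omega, by omega, ?_⟩
    rw [PySem.List.pyGetD_eq_getElem (i := (p : Int) + 1) S 0 (by omega) (by omega),
      PySem.List.pyGetD_eq_getElem (i := (p : Int) + 1 - 1) S 0 (by omega) (by omega),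
      pv_getElem_eq S (show ((p : Int) + 1).toNat = p + 1 by omega) (by omega) hp1S,
      pv_getElem_eq S (show ((p : Int) + 1 - 1).toNat = p by omega) (by omega) hpS]
    have hub : S[p + 1]'hp1S ≤ S[r]'hrS' := hmono (p + 1) r hp1S hrS' (by omega)
    rw [hgq, ← hxe, sub_self, abs_zero, hpe, hre] at *
    omega
  · rcases lt_or_gt_of_ne hxe with hlt | hlt
    · obtain ⟨p, hpS, hpe⟩ := List.getElem_of_mem (hperm.mem_iff.mpr (List.getElem_mem hiL))
      obtain ⟨r, hrS, hre⟩ := List.getElem_of_mem (hperm.mem_iff.mpr (List.getElem_mem hjL))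
      have hpr : p < r := by
        rcases Nat.lt_or_ge p r with hgood | hcon
        · exact hgood
        · have := hmono r p (by omega) hpS hcon
          omega
      have hp1S : p + 1 < S.length := by omega
      refine ⟨((p : Int)) + 1, by omega, by omega, ?_⟩
      rw [PySem.List.pyGetD_eq_getElem (i := (p : Int) + 1) S 0 (by omega) (by omega),
        PySem.List.pyGetD_eq_getElem (i := (p : Int) + 1 - 1) S 0 (by omega) (by omega),
        pv_getElem_eq S (show ((p : Int) + 1).toNat = p + 1 by omega) (by omega) hp1S,
        pv_getElem_eq S (show ((p : Int) + 1 - 1).toNat = p by omega) (by omega) hpS]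
      have hub : S[p + 1]'hp1S ≤ S[r]'hrS := hmono (p + 1) r hp1S hrS (by omega)
      rw [hgq, abs_of_nonneg (by omega)]
      omega
    · obtain ⟨p, hpS, hpe⟩ := List.getElem_of_mem (hperm.mem_iff.mpr (List.getElem_mem hjL))
      obtain ⟨r, hrS, hre⟩ := List.getElem_of_mem (hperm.mem_iff.mpr (List.getElem_mem hiL))
      have hpr : p < r := by
        rcases Nat.lt_or_ge p r with hgood | hcon
        · exact hgood
        · have := hmono r p (by omega) hpS hcon
          omega
      have hp1S : p + 1 < S.length := by omega
      refine ⟨((p : Int)) + 1, by omega, by omega, ?_⟩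
      rw [PySem.List.pyGetD_eq_getElem (i := (p : Int) + 1) S 0 (by omega) (by omega),
        PySem.List.pyGetD_eq_getElem (i := (p : Int) + 1 - 1) S 0 (by omega) (by omega),
        pv_getElem_eq S (show ((p : Int) + 1).toNat = p + 1 by omega) (by omega) hp1S,
        pv_getElem_eq S (show ((p : Int) + 1 - 1).toNat = p by omega) (by omega) hpS]
      have hub : S[p + 1]'hp1S ≤ S[r]'hrS := hmono (p + 1) r hp1S hrS (by omega)
      rw [hgq, abs_of_nonpos (by omega)]
      omega

-- the minimum over all pair differences equals B's minimal adjacent gap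
lemma pv_dmin_eq (T : List Int) (h2 : 2 ≤ T.length) :
    ((pvPairs (T.length : Int)).map (pvG T)).foldl min (pvG T (0, 1)) =
      (PySem.List.pyRange 2 (T.length : Int) 1).foldl (fun d k =>
        if PySem.List.pyGetD (PySem.List.sorted T (fun x => x) false) k 0 -
            PySem.List.pyGetD (PySem.List.sorted T (fun x => x) false) (k - 1) 0 < d then
          PySem.List.pyGetD (PySem.List.sorted T (fun x => x) false) k 0 -
            PySem.List.pyGetD (PySem.List.sorted T (fun x => x) false) (k - 1) 0
        else d)
      (PySem.List.pyGetD (PySem.List.sorted T (fun x => x) false) 1 0 -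
        PySem.List.pyGetD (PySem.List.sorted T (fun x => x) false) 0 0) := by
  set S := PySem.List.sorted T (fun x => x) false with hSdef
  have hfun : (fun (d k : Int) => if PySem.List.pyGetD S k 0 - PySem.List.pyGetD S (k - 1) 0 < d
        then PySem.List.pyGetD S k 0 - PySem.List.pyGetD S (k - 1) 0 else d)
      = fun (d k : Int) => min d (PySem.List.pyGetD S k 0 - PySem.List.pyGetD S (k - 1) 0) := by
    funext d k
    rw [min_def]
    split_ifs <;> omega
  rw [hfun]
  rw [show ((PySem.List.pyRange 2 ((T.length : Nat) : Int) 1).foldl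
      (fun (d k : Int) => min d (PySem.List.pyGetD S k 0 - PySem.List.pyGetD S (k - 1) 0))
      (PySem.List.pyGetD S 1 0 - PySem.List.pyGetD S 0 0)) =
      ((PySem.List.pyRange 2 ((T.length : Nat) : Int) 1).map
        (fun k : Int => PySem.List.pyGetD S k 0 - PySem.List.pyGetD S (k - 1) 0)).foldl min
      (PySem.List.pyGetD S 1 0 - PySem.List.pyGetD S 0 0) from (List.foldl_map).symm]
  have hMfacts := PySem.List.foldl_min_le ((pvPairs ((T.length : Nat) : Int)).map (pvG T)) (pvG T (0, 1))
  have hDfacts := PySem.List.foldl_min_le ((PySem.List.pyRange 2 ((T.length : Nat) : Int) 1).map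
    (fun k : Int => PySem.List.pyGetD S k 0 - PySem.List.pyGetD S (k - 1) 0))
    (PySem.List.pyGetD S 1 0 - PySem.List.pyGetD S 0 0)
  have h01 : ((0 : Int), (1 : Int)) ∈ pvPairs ((T.length : Nat) : Int) :=
    (pv_mem_pairs _ _).mpr ⟨le_refl _, by norm_num, by show (1 : Int) < _; omega⟩
  have hMle : ∀ q ∈ pvPairs ((T.length : Nat) : Int),
      ((pvPairs ((T.length : Nat) : Int)).map (pvG T)).foldl min (pvG T (0, 1)) ≤ pvG T q := by
    intro q hq
    exact hMfacts.2 _ (List.mem_map_of_mem hq)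
  have hMmem : ∃ q ∈ pvPairs ((T.length : Nat) : Int),
      ((pvPairs ((T.length : Nat) : Int)).map (pvG T)).foldl min (pvG T (0, 1)) = pvG T q := by
    rcases PySem.List.foldl_min_mem ((pvPairs ((T.length : Nat) : Int)).map (pvG T)) (pvG T (0, 1))
      with hh | hh
    · exact ⟨(0, 1), h01, hh⟩
    · obtain ⟨q, hq, hqe⟩ := List.mem_map.mp hh
      exact ⟨q, hq, hqe.symm⟩
  have hDle : ∀ k : Int, 1 ≤ k → k < ((T.length : Nat) : Int) →
      ((PySem.List.pyRange 2 ((T.length : Nat) : Int) 1).map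
        (fun k : Int => PySem.List.pyGetD S k 0 - PySem.List.pyGetD S (k - 1) 0)).foldl min
        (PySem.List.pyGetD S 1 0 - PySem.List.pyGetD S 0 0) ≤
      PySem.List.pyGetD S k 0 - PySem.List.pyGetD S (k - 1) 0 := by
    intro k hk1 hkn
    rcases eq_or_lt_of_le hk1 with he | hlt
    · rw [← he, show ((1 : Int) - 1) = 0 from by norm_num]
      exact hDfacts.1
    · exact hDfacts.2 _ (List.mem_map_of_mem (PySem.List.mem_pyRange_one.mpr ⟨by omega, hkn⟩))
  have hDmem : ∃ k : Int, 1 ≤ k ∧ k < ((T.length : Nat) : Int) ∧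
      ((PySem.List.pyRange 2 ((T.length : Nat) : Int) 1).map
        (fun k : Int => PySem.List.pyGetD S k 0 - PySem.List.pyGetD S (k - 1) 0)).foldl min
        (PySem.List.pyGetD S 1 0 - PySem.List.pyGetD S 0 0) =
      PySem.List.pyGetD S k 0 - PySem.List.pyGetD S (k - 1) 0 := by
    rcases PySem.List.foldl_min_mem ((PySem.List.pyRange 2 ((T.length : Nat) : Int) 1).map
        (fun k : Int => PySem.List.pyGetD S k 0 - PySem.List.pyGetD S (k - 1) 0))
        (PySem.List.pyGetD S 1 0 - PySem.List.pyGetD S 0 0) with hh | hh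
    · refine ⟨1, le_refl _, by omega, ?_⟩
      rw [show ((1 : Int) - 1) = 0 from by norm_num]
      exact hh
    · obtain ⟨k, hk, hke⟩ := List.mem_map.mp hh
      have hb := PySem.List.mem_pyRange_one.mp hk
      exact ⟨k, by omega, hb.2, hke.symm⟩
  obtain ⟨q0, hq0, hMq⟩ := hMmem
  obtain ⟨k0, hk01, hk0n, hDk⟩ := hDmem
  obtain ⟨q1, hq1, hq1e⟩ := pv_gap_realized T h2 k0 hk01 hk0n
  obtain ⟨k1, hk11, hk1n, hk1le⟩ := pv_gap_dominates T h2 q0 hq0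
  refine le_antisymm ?_ ?_
  · rw [hDk]
    rw [← hq1e]
    exact hMle q1 hq1
  · rw [hMq]
    exact le_trans (hDle k1 hk11 hk1n) hk1le

-- ===== VERDICT (by name: the statement is the Claim_ definition above) =====
theorem distance_min1_spec : Claim_equal_distance_min1 := by
  intro T hDom hPre
  have h2 : 2 ≤ T.length := hPre
  show distance_min1 T = distance_min1_alt T
  simp only [distance_min1, distance_min1_alt]
  have hA : List.foldl (fun s i => List.foldl (fun s j =>
        if |PySem.List.pyGetD T j 0 - PySem.List.pyGetD T i 0| < s.1 then
          (|PySem.List.pyGetD T j 0 - PySem.List.pyGetD T i 0|, (i, j))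
        else s) s (PySem.List.pyRange (i + 1) ((T.length : Nat) : Int) 1))
      (|PySem.List.pyGetD T 1 0 - PySem.List.pyGetD T 0 0|, ((0 : Int), (1 : Int)))
      (PySem.List.pyRange 0 ((T.length : Nat) : Int) 1) =
      (pvPairs ((T.length : Nat) : Int)).foldl
        (fun s q => if pvG T q < s.1 then (pvG T q, q) else s)
        (|PySem.List.pyGetD T 1 0 - PySem.List.pyGetD T 0 0|, ((0 : Int), (1 : Int))) := by
    unfold pvPairs
    rw [List.foldl_flatMap]
    simp only [List.foldl_map]
    rfl
  rw [hA, pv_argmin]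
  have hg01 : |PySem.List.pyGetD T 1 0 - PySem.List.pyGetD T 0 0| = pvG T (0, 1) := rfl
  rw [hg01, ← pv_dmin_eq T h2]
  have hP : List.flatMap (fun i : Int => List.map (fun j : Int => (i, j))
        (PySem.List.pyRange (i + 1) ((T.length : Nat) : Int) 1))
      (PySem.List.pyRange 0 ((T.length : Nat) : Int) 1) = pvPairs ((T.length : Nat) : Int) := rfl
  rw [hP]
  have hpred : (fun q : Int × Int => decide (|PySem.List.pyGetD T q.2 0 - PySem.List.pyGetD T q.1 0| =
      ((pvPairs ((T.length : Nat) : Int)).map (pvG T)).foldl min (pvG T (0, 1)))) =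
      (fun q : Int × Int => decide (pvG T q =
      ((pvPairs ((T.length : Nat) : Int)).map (pvG T)).foldl min (pvG T (0, 1)))) := rfl
  rw [hpred]
  by_cases hlt : ((pvPairs ((T.length : Nat) : Int)).map (pvG T)).foldl min (pvG T (0, 1)) < pvG T (0, 1)
  · rw [if_pos hlt]
  · rw [if_neg hlt]
    have hM0 : ((pvPairs ((T.length : Nat) : Int)).map (pvG T)).foldl min (pvG T (0, 1)) = pvG T (0, 1) :=
      le_antisymm (PySem.List.foldl_min_le _ _).1 (not_lt.mp hlt)
    obtain ⟨rest, hrest⟩ := pv_pairs_cons ((T.length : Nat) : Int) (by omega)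
    rw [hrest, List.find?_cons_of_pos (by simp only [decide_eq_true_eq]; rw [← hrest]; exact hM0.symm)]
    rfl
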